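-- pv_equiv track=rewrite | github.com/Ohjiwoo-lab/Baekjoon_study | 프로그래머스/0/181904. 세로 읽기/세로 읽기.py | solution
-- ===== SOURCE A (Python) =====
-- def solution(my_string, m, c):
--     answer = ''
--
--     s=[]
--     for i in range(len(my_string)//m):
--         s.append(my_string[m*i:m*(i+1)])
--
--     for i in s:
--         answer+=i[c-1]
--
--     return answer
-- ===== SOURCE B (Python) =====
-- def solution(my_string, m, c):
--     # Read column c directly with one strided slice, capped at the last full row.
--     n = (len(my_string) // m) * m
--     return my_string[c - 1:n:m]
-- ===== Notes on version B (the rewrite author's own statement) =====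
-- stated objective: simpler
-- what changed: Replaces the build-rows-then-index-each-row decomposition (two loops and an intermediate list of row substrings) with a single strided slice my_string[c-1:n:m] capped at n = (len//m)*m.
-- outside the precondition, e.g. on solution('abcdef', 3, 0): A returns 'cf', B returns 'f'
import Mathlib
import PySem

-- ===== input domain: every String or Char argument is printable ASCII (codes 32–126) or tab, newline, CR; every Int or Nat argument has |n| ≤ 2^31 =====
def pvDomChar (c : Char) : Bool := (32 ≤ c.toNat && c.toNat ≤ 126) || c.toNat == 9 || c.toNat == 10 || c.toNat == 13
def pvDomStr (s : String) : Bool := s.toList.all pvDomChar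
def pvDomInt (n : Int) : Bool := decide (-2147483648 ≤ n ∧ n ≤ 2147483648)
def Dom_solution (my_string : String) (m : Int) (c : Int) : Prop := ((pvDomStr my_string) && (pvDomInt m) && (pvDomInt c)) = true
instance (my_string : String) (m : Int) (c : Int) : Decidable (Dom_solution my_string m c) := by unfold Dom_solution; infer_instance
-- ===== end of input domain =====

-- B replaces A's build-rows-then-index-each-row decomposition with one strided slice; objective: simpler.

-- ===== PORT A =====
def solution (my_string : String) (m : Int) (c : Int) : String :=
  let s : List (List Char) :=
    (PySem.List.pyRange 0 (PySem.Int.floordiv (PySem.Str.len my_string) m) 1).foldl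
      (fun acc i => acc ++ [PySem.List.slice my_string.toList (some (m * i)) (some (m * (i + 1)))]) []
  -- answer += i[c-1]; Python raises IndexError when pyGet? is none (excluded by Pre_): the port appends nothing there
  let answer : List Char :=
    s.foldl (fun acc row => acc ++ ((PySem.List.pyGet? row (c - 1)).map (fun ch => [ch])).getD []) []
  String.ofList answer

-- ===== PORT B =====
def solution_alt (my_string : String) (m : Int) (c : Int) : String :=
  -- Python raises ZeroDivisionError on m = 0 (excluded by Pre_); slice? is none exactly for step 0
  let n : Int := (PySem.Int.floordiv (PySem.Str.len my_string) m) * m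
  (PySem.Str.slice? my_string (some (c - 1)) (some n) m).getD ""

-- ===== PRECONDITION & SPEC =====
-- Pre_ excludes m = 0 (ZeroDivisionError), column indices outside [1, m] when a full row exists
-- (IndexError for c > m or c < 1-m; for 1-m ≤ c ≤ 0 A's value comes from i[c-1] negative-index
-- wraparound, an accident of the implementation no caller of a 1-indexed column reader would rely on).
def Pre_solution (my_string : String) (m : Int) (c : Int) : Prop :=
  m < 0 ∨ (1 ≤ m ∧ ((1 ≤ c ∧ c ≤ m) ∨ (my_string.toList.length : Int) < m))
instance (my_string : String) (m : Int) (c : Int) : Decidable (Pre_solution my_string m c) := by unfold Pre_solution; infer_instance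
def pvWitness_solution : String × Int × Int := ("abcdef", 3, 2)
def Spec_solution (my_string : String) (m : Int) (c : Int) (out : String) : Prop := out = solution_alt my_string m c
instance (my_string : String) (m : Int) (c : Int) (out : String) : Decidable (Spec_solution my_string m c out) := by unfold Spec_solution; infer_instance

-- ===== CLAIM (what is proved, stated in full; the proofs are below) =====
def Claim_equal_solution : Prop := ∀ (my_string : String) (m : Int) (c : Int), Dom_solution my_string m c → Pre_solution my_string m c → Spec_solution my_string m c (solution my_string m c)

-- ===== LEMMAS AND PROOFS =====

-- the common normal form: the column as a map over the row indices
def pvCol (L : List Char) (M C : Nat) : List Char :=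
  (List.range (L.length / M)).map (fun k => L.getD (M * k + C) ' ')

theorem pv_floordiv_nat (len M : Nat) (hM : 0 < M) :
    PySem.Int.floordiv (len : Int) (M : Int) = ((len / M : Nat) : Int) := by
  rw [PySem.Int.floordiv_eq_iff_of_pos (by exact_mod_cast hM)]
  have h3 : len / M * M ≤ len := Nat.div_mul_le_self len M
  have h4 : len < (len / M + 1) * M := by
    nlinarith [Nat.div_add_mod len M, Nat.mod_lt len hM]
  exact ⟨by exact_mod_cast h3, by exact_mod_cast h4⟩

theorem pv_filterMap_eq_map {α β : Type} (l : List α) (f : α → Option β) (g : α → β)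
    (h : ∀ x ∈ l, f x = some (g x)) : l.filterMap f = l.map g := by
  induction l with
  | nil => rfl
  | cons a t ih => simp [h a (by simp), ih (fun x hx => h x (by simp [hx]))]

theorem pv_flatMap_eq_map {α β : Type} (l : List α) (g : α → List β) (h : α → β)
    (hgh : ∀ x ∈ l, g x = [h x]) : l.flatMap g = l.map h := by
  induction l with
  | nil => rfl
  | cons a t ih => simp [hgh a (by simp), ih (fun x hx => hgh x (by simp [hx]))]

theorem pv_A_eq (L : List Char) (m c : Int) (hm : 1 ≤ m) (hc : 1 ≤ c) (hcm : c ≤ m) :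
    (((PySem.List.pyRange 0 (PySem.Int.floordiv (L.length : Int) m) 1).foldl
      (fun acc i => acc ++ [PySem.List.slice L (some (m * i)) (some (m * (i + 1)))]) []).foldl
      (fun acc row => acc ++ ((PySem.List.pyGet? row (c - 1)).map (fun ch => [ch])).getD []) [])
    = pvCol L m.toNat (c - 1).toNat := by
  obtain ⟨M, rfl⟩ : ∃ M : Nat, m = (M : Int) := ⟨m.toNat, by omega⟩
  obtain ⟨C, rfl⟩ : ∃ C : Nat, c = (C : Int) + 1 := ⟨(c - 1).toNat, by omega⟩
  have hM : 0 < M := by exact_mod_cast hm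
  have hCM : C < M := by exact_mod_cast hcm
  rw [pv_floordiv_nat _ _ hM, PySem.List.foldl_append_singleton_eq_map,
    PySem.List.foldl_append_eq_flatMap, List.nil_append, List.nil_append,
    PySem.List.pyRange_one]
  simp only [Int.sub_zero, Int.toNat_natCast, zero_add, add_sub_cancel_right]
  rw [pvCol, List.flatMap_map]
  have step1 : List.flatMap
      (fun a => (Option.map (fun ch => [ch])
        (PySem.List.pyGet? (PySem.List.slice L (some ((M : Int) * a)) (some ((M : Int) * (a + 1)))) (C : Int))).getD [])
      (List.map (fun k : Nat => (k : Int)) (List.range (L.length / M)))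
      = List.map (fun a : Int => L.getD (M * a.toNat + C) ' ')
          (List.map (fun k : Nat => (k : Int)) (List.range (L.length / M))) := by
    apply pv_flatMap_eq_map
    intro a ha
    obtain ⟨k, hk, rfl⟩ := List.mem_map.mp ha
    simp only [Int.toNat_natCast]
    have hkq : k < L.length / M := List.mem_range.mp hk
    have hidx : M * k + C < L.length := by
      have h1 : M * (k + 1) = M * k + M := by ring
      have h2 : M * (k + 1) ≤ M * (L.length / M) := Nat.mul_le_mul_left _ (by omega)
      have h3 : M * (L.length / M) ≤ L.length := Nat.mul_div_le L.length M
      omega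
    have e1 : (M : Int) * (k : Int) = ((M * k : Nat) : Int) := by push_cast; ring
    have e2 : (M : Int) * ((k : Int) + 1) = ((M * k : Nat) : Int) + ((M : Nat) : Int) := by
      push_cast; ring
    rw [e1, e2, PySem.List.slice_natCast_add, PySem.List.pyGet?_natCast,
      List.getElem?_take_of_lt hCM, List.getElem?_drop,
      List.getElem?_eq_getElem (by omega : M * k + C < L.length)]
    simp only [Option.map_some, Option.getD_some, List.cons.injEq, and_true]
    rw [List.getD_eq_getElem L ' ' (by omega : M * k + C < L.length)]
  rw [step1, List.map_map]
  exact List.map_congr_left (fun k _ => by simp)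

theorem pv_B_eq (L : List Char) (m c : Int) (hm : 1 ≤ m) (hc : 1 ≤ c) (hcm : c ≤ m) :
    PySem.List.slice? L (some (c - 1)) (some ((PySem.Int.floordiv (L.length : Int) m) * m)) m
    = some (pvCol L m.toNat (c - 1).toNat) := by
  obtain ⟨M, rfl⟩ : ∃ M : Nat, m = (M : Int) := ⟨m.toNat, by omega⟩
  obtain ⟨C, rfl⟩ : ∃ C : Nat, c = (C : Int) + 1 := ⟨(c - 1).toNat, by omega⟩
  have hM : 0 < M := by exact_mod_cast hm
  have hCM : C < M := by exact_mod_cast hcm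
  have hql : L.length / M * M ≤ L.length := Nat.div_mul_le_self _ _
  have hQ : PySem.Int.floordiv (L.length : Int) (M : Int) = ((L.length / M : Nat) : Int) :=
    pv_floordiv_nat _ _ hM
  have hqM0 : (0 : Int) ≤ ((L.length / M : Nat) : Int) * (M : Int) := by positivity
  rw [hQ]
  unfold PySem.List.slice? PySem.List.sliceIndices
  rw [if_neg (show ¬ (M : Int) = 0 by omega)]
  simp only [if_neg (show ¬ (M : Int) < 0 by omega), if_pos (show (0:Int) < (M:Int) by omega),
    if_neg (show ¬ ((C : Int) + 1 - 1 < 0) by omega),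
    if_neg (not_lt.mpr hqM0),
    min_eq_left (show ((L.length / M : Nat) : Int) * (M : Int) ≤ (L.length : Int) by exact_mod_cast hql)]
  simp only [add_sub_cancel_right, Int.toNat_natCast]
  by_cases hcase : min (C : Int) (L.length : Int) < ((L.length / M : Nat) : Int) * (M : Int)
  · have hClt : C < L.length / M * M := by
      rcases le_total (C : Int) (L.length : Int) with h | h
      · rw [min_eq_left h] at hcase; exact_mod_cast hcase
      · rw [min_eq_right h] at hcase; exact absurd hcase (by exact_mod_cast not_lt.mpr hql)
    have hClen : (C : Int) ≤ (L.length : Int) := by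
      have : C < L.length := lt_of_lt_of_le hClt hql
      exact_mod_cast this.le
    rw [if_pos hcase, min_eq_left hClen]
    have hcount : ((((L.length / M : Nat) : Int) * M - C + M - 1) / M).toNat = L.length / M := by
      have harr : ((L.length / M : Nat) : Int) * M - C + M - 1
          = ((M - 1 - C : Nat) : Int) + ((L.length / M : Nat) : Int) * (M : Int) := by
        push_cast [Nat.cast_sub hCM.le, Nat.cast_sub (by omega : 1 ≤ M)]
        omega
      rw [harr, Int.add_mul_ediv_right _ _ (show (M:Int) ≠ 0 by omega),
        Int.ediv_eq_zero_of_lt (by positivity) (by exact_mod_cast (by omega : M - 1 - C < M)),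
        zero_add, Int.toNat_natCast]
    rw [hcount]
    rw [pv_filterMap_eq_map _ _ (fun k => L.getD (M * k + C) ' ')]
    · rw [pvCol]
    · intro x hx
      have hxq : x < L.length / M := List.mem_range.mp hx
      have hidx : C + M * x < L.length := by
        have h1 : M * (x + 1) = M * x + M := by ring
        have h2 : M * (x + 1) ≤ M * (L.length / M) := Nat.mul_le_mul_left _ (by omega)
        have h3 : M * (L.length / M) ≤ L.length := Nat.mul_div_le L.length M
        omega
      have htn : ((C : Int) + (M : Int) * (x : Int)).toNat = M * x + C := by
        omega
      rw [htn, List.getElem?_eq_getElem (by omega : M * x + C < L.length),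
        List.getD_eq_getElem L ' ' (by omega : M * x + C < L.length)]
  · rw [if_neg hcase]
    have hq0 : L.length / M = 0 := by
      have h1 : ((L.length / M : Nat) : Int) * (M : Int) ≤ min (C : Int) (L.length : Int) := not_lt.mp hcase
      have h2 : ((L.length / M : Nat) : Int) * (M : Int) ≤ (C : Int) := le_trans h1 (min_le_left _ _)
      by_contra hne
      have h3 : (M : Int) ≤ ((L.length / M : Nat) : Int) * (M : Int) := by
        have h4 : (1:Int) ≤ ((L.length / M : Nat) : Int) := by exact_mod_cast Nat.one_le_iff_ne_zero.mpr hne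
        nlinarith
      omega
    rw [pvCol, hq0]
    simp

theorem pv_le_fdiv_mul (a b : Int) (h : b < 0) : a ≤ a.fdiv b * b := by
  have h1 : b * a.fdiv b + a.fmod b = a := Int.mul_fdiv_add_fmod a b
  have h2 : a.fmod b ≤ 0 := by
    rw [Int.fmod_eq_emod]
    by_cases hd : 0 ≤ b ∨ b ∣ a
    · rcases hd with h3 | h3
      · omega
      · simp [Int.emod_eq_zero_of_dvd h3, h3]
    · have h4 : a % b = a % (-b) := (Int.emod_neg a b).symm ▸ rfl
      have h5 : 0 ≤ a % (-b) := Int.emod_nonneg a (by omega)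
      have h6 : a % (-b) < -b := Int.emod_lt_of_pos a (by omega)
      simp only [if_neg hd]
      omega
  nlinarith [h1]

theorem pv_B_empty_neg (L : List Char) (m c : Int) (hm : m < 0) :
    PySem.List.slice? L (some (c - 1)) (some ((PySem.Int.floordiv (L.length : Int) m) * m)) m
    = some [] := by
  have hn : (L.length : Int) ≤ (PySem.Int.floordiv (L.length : Int) m) * m :=
    pv_le_fdiv_mul _ _ hm
  unfold PySem.List.slice? PySem.List.sliceIndices
  rw [if_neg (show ¬ m = 0 by omega)]
  simp only [if_pos hm, if_neg (show ¬ (0:Int) < m by omega)]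
  by_cases hc : c - 1 < 0 <;>
    by_cases hneg : PySem.Int.floordiv (L.length : Int) m * m < 0
  · simp only [if_pos hc, if_pos hneg]
    split_ifs with h
    · exfalso; omega
    · simp
  · simp only [if_pos hc, if_neg hneg]
    split_ifs with h
    · exfalso; omega
    · simp
  · simp only [if_neg hc, if_pos hneg]
    split_ifs with h
    · exfalso; omega
    · simp
  · simp only [if_neg hc, if_neg hneg]
    split_ifs with h
    · exfalso; omega
    · simp

theorem pv_B_empty_short (L : List Char) (m c : Int) (hm : 1 ≤ m) (hlen : (L.length : Int) < m) :
    PySem.List.slice? L (some (c - 1)) (some ((PySem.Int.floordiv (L.length : Int) m) * m)) m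
    = some [] := by
  have hq : PySem.Int.floordiv (L.length : Int) m = 0 := by
    rw [PySem.Int.floordiv_eq_iff_of_pos (by omega)]
    constructor <;> [simp; omega]
  rw [hq, zero_mul]
  unfold PySem.List.slice? PySem.List.sliceIndices
  rw [if_neg (show ¬ m = 0 by omega)]
  simp only [if_neg (show ¬ m < 0 by omega), if_pos (show (0:Int) < m by omega),
    if_neg (show ¬ (0:Int) < 0 by omega)]
  by_cases hc : c - 1 < 0
  · simp only [if_pos hc]
    split_ifs with h
    · exfalso; omega
    · simp
  · simp only [if_neg hc]
    split_ifs with h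
    · exfalso; omega
    · simp

theorem pv_fdiv_nonpos (a b : Int) (ha : 0 ≤ a) (hb : b < 0) :
    PySem.Int.floordiv a b ≤ 0 := by
  by_contra h
  have h1 : 1 ≤ PySem.Int.floordiv a b := by omega
  have h2 : a ≤ PySem.Int.floordiv a b * b := pv_le_fdiv_mul a b hb
  have h3 : PySem.Int.floordiv a b * b ≤ b := by nlinarith
  omega

theorem pv_glue (s : String) (m c : Int) (l : List Char)
    (hA : (((PySem.List.pyRange 0 (PySem.Int.floordiv ((s.toList.length : Nat) : Int) m) 1).foldl
      (fun acc i => acc ++ [PySem.List.slice s.toList (some (m * i)) (some (m * (i + 1)))]) []).foldl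
      (fun acc row => acc ++ ((PySem.List.pyGet? row (c - 1)).map (fun ch => [ch])).getD []) []) = l)
    (hB : PySem.List.slice? s.toList (some (c - 1))
      (some ((PySem.Int.floordiv ((s.toList.length : Nat) : Int) m) * m)) m = some l) :
    solution s m c = solution_alt s m c := by
  unfold solution solution_alt
  simp only [PySem.Str.len_eq]
  have hs : Option.map String.toList (PySem.Str.slice? s (some (c - 1))
      (some ((PySem.Int.floordiv ((s.toList.length : Nat) : Int) m) * m)) m)
      = PySem.List.slice? s.toList (some (c - 1))
        (some ((PySem.Int.floordiv ((s.toList.length : Nat) : Int) m) * m)) m := by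
    rw [PySem.Str.slice?_map, PySem.Chars.slice?_eq_listSlice?]
  rw [hB] at hs
  cases hres : PySem.Str.slice? s (some (c - 1))
      (some ((PySem.Int.floordiv ((s.toList.length : Nat) : Int) m) * m)) m with
  | none => rw [hres] at hs; simp at hs
  | some r =>
    rw [hres] at hs
    simp only [Option.map_some, Option.some.injEq] at hs
    simp only [Option.getD_some]
    rw [hA, ← hs, String.ofList_toList]

-- ===== VERDICT (by name: the statement is the Claim_ definition above) =====
theorem solution_spec : Claim_equal_solution := by
  intro s m c _ hpre
  unfold Spec_solution
  rcases hpre with hm | ⟨hm, hc | hlen⟩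
  · -- m < 0: A builds no rows; B's backward-stepping slice is empty
    apply pv_glue s m c []
    · rw [PySem.List.pyRange_one_eq_nil
        (pv_fdiv_nonpos ((s.toList.length : Nat) : Int) m (by positivity) hm)]
      rfl
    · exact pv_B_empty_neg s.toList m c hm
  · -- the main case: 1 ≤ c ≤ m
    exact pv_glue s m c (pvCol s.toList m.toNat (c - 1).toNat)
      (pv_A_eq s.toList m c hm hc.1 hc.2) (pv_B_eq s.toList m c hm hc.1 hc.2)
  · -- 1 ≤ m with no full row: both sides are empty
    have hq : PySem.Int.floordiv ((s.toList.length : Nat) : Int) m = 0 := by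
      rw [PySem.Int.floordiv_eq_iff_of_pos (by omega)]
      constructor <;> [simp; omega]
    apply pv_glue s m c []
    · rw [hq, PySem.List.pyRange_one_eq_nil (le_refl 0)]
      rfl
    · exact pv_B_empty_short s.toList m c hm hlen
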